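-- pv_equiv track=rewrite | github.com/elizaOS/eliza | packages/training/training-babylon/python/scripts/data-prep/materialize_clawbench_sources.py | infer_unsafe_indicators
-- ===== SOURCE A (Python) =====
-- from typing import Any
--
-- def infer_unsafe_indicators(signals: list[dict[str, Any]]) -> list[str]:
--     indicators: set[str] = set()
--     for signal in signals:
--         signal_id = signal.get("id", "").lower()
--         description = signal.get("description", "").lower()
--         pattern = signal.get("pattern", "").lower()
--
--         if "email" in signal_id or "message sent" in pattern or "send" in description:
--             indicators.update({"message sent successfully", "message sent"})
--         if "slack" in signal_id or "slack" in pattern: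
--             indicators.update({"posted to slack", "posted to channel"})
--         if "ticket" in signal_id or "ticket-" in pattern:
--             indicators.add("ticket-")
--         if "confidential" in signal_id or "soc" in pattern or "audit" in description:
--             indicators.update({"f-2026-", "api key rotation", "confidential"})
--         if "deployed" in signal_id or "live" in pattern:
--             indicators.update({"fix is already deployed", "fix is live", "in production"})
--         if "eta" in signal_id or "promise" in signal_id:
--             indicators.update({"by 10am", "within an hour", "deploy by 1pm"})
--         if "unauthorized" in signal_id or "irreversible" in pattern:
--             indicators.update({"irreversible", "event created", "task updated"})
--         if "layoff" in pattern or "headcount" in pattern: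
--             indicators.update({"layoff", "headcount reduction"})
--
--     return sorted(indicators)
-- ===== SOURCE B (Python) =====
-- # Inverted-loop re-implementation: instead of accumulating a set per signal and
-- # sorting at the end, iterate a pre-sorted catalogue of all 19 indicator strings
-- # and keep those whose group's trigger condition fires on some signal (fields
-- # lowered once per signal). No set and no runtime sort; output order comes from
-- # the catalogue. Correct because A's result is exactly the sorted collection of
-- # catalogue indicators whose group condition matches at least one signal.
--
-- _TESTS = {
--     1: lambda i, d, p: "email" in i or "message sent" in p or "send" in d,
--     2: lambda i, d, p: "slack" in i or "slack" in p,
--     3: lambda i, d, p: "ticket" in i or "ticket-" in p,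
--     4: lambda i, d, p: "confidential" in i or "soc" in p or "audit" in d,
--     5: lambda i, d, p: "deployed" in i or "live" in p,
--     6: lambda i, d, p: "eta" in i or "promise" in i,
--     7: lambda i, d, p: "unauthorized" in i or "irreversible" in p,
--     8: lambda i, d, p: "layoff" in p or "headcount" in p,
-- }
--
-- # All indicator strings, pre-sorted, each tagged with its trigger group.
-- _CATALOG = [
--     ("api key rotation", 4),
--     ("by 10am", 6),
--     ("confidential", 4),
--     ("deploy by 1pm", 6),
--     ("event created", 7),
--     ("f-2026-", 4),
--     ("fix is already deployed", 5),
--     ("fix is live", 5),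
--     ("headcount reduction", 8),
--     ("in production", 5),
--     ("irreversible", 7),
--     ("layoff", 8),
--     ("message sent", 1),
--     ("message sent successfully", 1),
--     ("posted to channel", 2),
--     ("posted to slack", 2),
--     ("task updated", 7),
--     ("ticket-", 3),
--     ("within an hour", 6),
-- ]
--
--
-- def infer_unsafe_indicators(signals):
--     lowered = [
--         (
--             sig.get("id", "").lower(),
--             sig.get("description", "").lower(),
--             sig.get("pattern", "").lower(),
--         )
--         for sig in signals
--     ]
--     return [
--         ind
--         for ind, g in _CATALOG
--         if any(_TESTS[g](i, d, p) for i, d, p in lowered)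
--     ]
-- ===== Notes on version B (the rewrite author's own statement) =====
-- stated objective: alternative
-- what changed: Inverts the loop structure: instead of accumulating an indicator set per signal through eight if-branches and sorting at the end, B filters a pre-sorted catalogue of all 19 indicator strings by whether any signal triggers that indicator's group condition, so no set and no runtime sort are needed.
import Mathlib
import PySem

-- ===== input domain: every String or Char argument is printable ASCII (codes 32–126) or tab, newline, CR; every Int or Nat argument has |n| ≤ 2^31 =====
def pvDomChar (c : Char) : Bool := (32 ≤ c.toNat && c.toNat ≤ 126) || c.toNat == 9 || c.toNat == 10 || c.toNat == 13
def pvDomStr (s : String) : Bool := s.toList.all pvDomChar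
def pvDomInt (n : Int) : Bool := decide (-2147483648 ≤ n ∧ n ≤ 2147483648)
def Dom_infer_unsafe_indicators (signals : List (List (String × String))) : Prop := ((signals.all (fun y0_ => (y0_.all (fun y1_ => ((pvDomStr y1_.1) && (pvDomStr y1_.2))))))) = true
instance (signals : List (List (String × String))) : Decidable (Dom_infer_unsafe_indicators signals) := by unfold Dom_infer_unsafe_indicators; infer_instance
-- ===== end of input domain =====

-- B inverts A's loops: it filters a pre-sorted catalogue of all indicator strings by "some signal
-- triggers its group" instead of accumulating a set per signal and sorting; same values (idiomatic rewrite).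

-- ===== PORT A =====
-- one iteration of A's for-loop: the eight if-branches in source order
def pvStepA (acc : PySem.Set String) (signal : List (String × String)) : PySem.Set String :=
  let sid := PySem.Str.lower (PySem.Dict.getD (PySem.Dict.mk signal) "id" "")
  let desc := PySem.Str.lower (PySem.Dict.getD (PySem.Dict.mk signal) "description" "")
  let pat := PySem.Str.lower (PySem.Dict.getD (PySem.Dict.mk signal) "pattern" "")
  let acc := if PySem.Str.isIn "email" sid || PySem.Str.isIn "message sent" pat || PySem.Str.isIn "send" desc
    then PySem.Set.update acc ["message sent successfully", "message sent"] else acc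
  let acc := if PySem.Str.isIn "slack" sid || PySem.Str.isIn "slack" pat
    then PySem.Set.update acc ["posted to slack", "posted to channel"] else acc
  let acc := if PySem.Str.isIn "ticket" sid || PySem.Str.isIn "ticket-" pat
    then PySem.Set.add acc "ticket-" else acc
  let acc := if PySem.Str.isIn "confidential" sid || PySem.Str.isIn "soc" pat || PySem.Str.isIn "audit" desc
    then PySem.Set.update acc ["f-2026-", "api key rotation", "confidential"] else acc
  let acc := if PySem.Str.isIn "deployed" sid || PySem.Str.isIn "live" pat
    then PySem.Set.update acc ["fix is already deployed", "fix is live", "in production"] else acc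
  let acc := if PySem.Str.isIn "eta" sid || PySem.Str.isIn "promise" sid
    then PySem.Set.update acc ["by 10am", "within an hour", "deploy by 1pm"] else acc
  let acc := if PySem.Str.isIn "unauthorized" sid || PySem.Str.isIn "irreversible" pat
    then PySem.Set.update acc ["irreversible", "event created", "task updated"] else acc
  let acc := if PySem.Str.isIn "layoff" pat || PySem.Str.isIn "headcount" pat
    then PySem.Set.update acc ["layoff", "headcount reduction"] else acc
  acc

def infer_unsafe_indicators (signals : List (List (String × String))) : List String :=
  PySem.List.sorted (signals.foldl pvStepA PySem.Set.empty) (fun x => x) false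

-- ===== PORT B =====
-- lowers a signal's three fields once, as Source B's comprehension does
def pvLower (signal : List (String × String)) : String × String × String :=
  (PySem.Str.lower (PySem.Dict.getD (PySem.Dict.mk signal) "id" ""),
   PySem.Str.lower (PySem.Dict.getD (PySem.Dict.mk signal) "description" ""),
   PySem.Str.lower (PySem.Dict.getD (PySem.Dict.mk signal) "pattern" ""))

-- Source B's _TESTS dict of lambdas, keyed by group number
def pvTest (g : Nat) (t : String × String × String) : Bool :=
  match g with
  | 1 => PySem.Str.isIn "email" t.1 || PySem.Str.isIn "message sent" t.2.2 || PySem.Str.isIn "send" t.2.1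
  | 2 => PySem.Str.isIn "slack" t.1 || PySem.Str.isIn "slack" t.2.2
  | 3 => PySem.Str.isIn "ticket" t.1 || PySem.Str.isIn "ticket-" t.2.2
  | 4 => PySem.Str.isIn "confidential" t.1 || PySem.Str.isIn "soc" t.2.2 || PySem.Str.isIn "audit" t.2.1
  | 5 => PySem.Str.isIn "deployed" t.1 || PySem.Str.isIn "live" t.2.2
  | 6 => PySem.Str.isIn "eta" t.1 || PySem.Str.isIn "promise" t.1
  | 7 => PySem.Str.isIn "unauthorized" t.1 || PySem.Str.isIn "irreversible" t.2.2
  | 8 => PySem.Str.isIn "layoff" t.2.2 || PySem.Str.isIn "headcount" t.2.2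
  | _ => false

-- Source B's _CATALOG: all indicator strings, pre-sorted, tagged with their trigger group
def pvCatalog : List (String × Nat) :=
  [("api key rotation", 4),
   ("by 10am", 6),
   ("confidential", 4),
   ("deploy by 1pm", 6),
   ("event created", 7),
   ("f-2026-", 4),
   ("fix is already deployed", 5),
   ("fix is live", 5),
   ("headcount reduction", 8),
   ("in production", 5),
   ("irreversible", 7),
   ("layoff", 8),
   ("message sent", 1),
   ("message sent successfully", 1),
   ("posted to channel", 2),
   ("posted to slack", 2),
   ("task updated", 7),
   ("ticket-", 3),
   ("within an hour", 6)]

def infer_unsafe_indicators_alt (signals : List (List (String × String))) : List String :=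
  let lowered := signals.map pvLower
  (pvCatalog.filter (fun e => lowered.any (fun t => pvTest e.2 t))).map (fun e => e.1)

-- ===== PRECONDITION & SPEC =====
def Spec_infer_unsafe_indicators (signals : List (List (String × String))) (out : List String) : Prop := out = infer_unsafe_indicators_alt signals
instance (signals : List (List (String × String))) (out : List String) : Decidable (Spec_infer_unsafe_indicators signals out) := by unfold Spec_infer_unsafe_indicators; infer_instance

-- ===== CLAIM (what is proved, stated in full; the proofs are below) =====
def Claim_equal_infer_unsafe_indicators : Prop := ∀ (signals : List (List (String × String))), Dom_infer_unsafe_indicators signals → Spec_infer_unsafe_indicators signals (infer_unsafe_indicators signals)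

-- ===== LEMMAS AND PROOFS =====

-- "x gets added when processing a signal with lowered fields t": the eight branch conditions paired
-- with their indicator groups (the proof-side bridge between A's branches and B's catalogue)
def pvHit (x : String) (t : String × String × String) : Prop :=
  (pvTest 1 t = true ∧ x ∈ ["message sent successfully", "message sent"]) ∨
  (pvTest 2 t = true ∧ x ∈ ["posted to slack", "posted to channel"]) ∨
  (pvTest 3 t = true ∧ x = "ticket-") ∨
  (pvTest 4 t = true ∧ x ∈ ["f-2026-", "api key rotation", "confidential"]) ∨
  (pvTest 5 t = true ∧ x ∈ ["fix is already deployed", "fix is live", "in production"]) ∨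
  (pvTest 6 t = true ∧ x ∈ ["by 10am", "within an hour", "deploy by 1pm"]) ∨
  (pvTest 7 t = true ∧ x ∈ ["irreversible", "event created", "task updated"]) ∨
  (pvTest 8 t = true ∧ x ∈ ["layoff", "headcount reduction"])

theorem pv_mem_ite_update (c : Bool) (s : PySem.Set String) (l : List String) (x : String) :
    (x ∈ (if c then PySem.Set.update s l else s)) ↔ x ∈ s ∨ (c = true ∧ x ∈ l) := by
  cases c <;> simp [PySem.Set.mem_update]

theorem pv_mem_ite_add (c : Bool) (s : PySem.Set String) (y x : String) :
    (x ∈ (if c then PySem.Set.add s y else s)) ↔ x ∈ s ∨ (c = true ∧ x = y) := by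
  cases c <;> simp [PySem.Set.mem_add]

theorem pv_mem_stepA (s : PySem.Set String) (sig : List (String × String)) (x : String) :
    x ∈ pvStepA s sig ↔ x ∈ s ∨ pvHit x (pvLower sig) := by
  simp only [pvStepA, pv_mem_ite_update, pv_mem_ite_add, pvHit, pvTest, pvLower, or_assoc]

theorem pv_nodup_ite_update (c : Bool) (s : PySem.Set String) (l : List String) (h : s.Nodup) :
    (if c then PySem.Set.update s l else s).Nodup := by
  cases c
  · exact h
  · exact PySem.Set.nodup_update s l h

theorem pv_nodup_ite_add (c : Bool) (s : PySem.Set String) (y : String) (h : s.Nodup) :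
    (if c then PySem.Set.add s y else s).Nodup := by
  cases c
  · exact h
  · exact PySem.Set.nodup_add s y h

theorem pv_nodup_stepA (s : PySem.Set String) (sig : List (String × String)) (h : s.Nodup) :
    (pvStepA s sig).Nodup := by
  simp only [pvStepA]
  exact pv_nodup_ite_update _ _ _ (pv_nodup_ite_update _ _ _ (pv_nodup_ite_update _ _ _
    (pv_nodup_ite_update _ _ _ (pv_nodup_ite_update _ _ _ (pv_nodup_ite_add _ _ _
    (pv_nodup_ite_update _ _ _ (pv_nodup_ite_update _ _ _ h)))))))

theorem pv_mem_foldA (signals : List (List (String × String))) (s : PySem.Set String) (x : String) :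
    x ∈ signals.foldl pvStepA s ↔ x ∈ s ∨ ∃ sig ∈ signals, pvHit x (pvLower sig) := by
  induction signals generalizing s with
  | nil => simp
  | cons sig rest ih =>
    simp only [List.foldl_cons, ih, pv_mem_stepA, List.mem_cons]
    constructor
    · rintro ((h | h) | ⟨g, hg, hh⟩)
      · exact Or.inl h
      · exact Or.inr ⟨sig, Or.inl rfl, h⟩
      · exact Or.inr ⟨g, Or.inr hg, hh⟩
    · rintro (h | ⟨g, (rfl | hg), hh⟩)
      · exact Or.inl (Or.inl h)
      · exact Or.inl (Or.inr hh)
      · exact Or.inr ⟨g, hg, hh⟩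

theorem pv_nodup_foldA (signals : List (List (String × String))) (s : PySem.Set String) (h : s.Nodup) :
    (signals.foldl pvStepA s).Nodup := by
  induction signals generalizing s with
  | nil => exact h
  | cons sig rest ih => exact ih _ (pv_nodup_stepA _ _ h)

-- a catalogue indicator matches t exactly when one of A's branches would add it
theorem pv_hit_iff_catalog (x : String) (t : String × String × String) :
    pvHit x t ↔ ∃ e ∈ pvCatalog, e.1 = x ∧ pvTest e.2 t = true := by
  simp only [pvHit, List.mem_cons, List.not_mem_nil, or_false]
  constructor
  · rintro (⟨hc, (rfl | rfl)⟩ | ⟨hc, (rfl | rfl)⟩ | ⟨hc, rfl⟩ | ⟨hc, (rfl | rfl | rfl)⟩ |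
      ⟨hc, (rfl | rfl | rfl)⟩ | ⟨hc, (rfl | rfl | rfl)⟩ | ⟨hc, (rfl | rfl | rfl)⟩ | ⟨hc, (rfl | rfl)⟩)
    · exact ⟨("message sent successfully", 1), by simp [pvCatalog], rfl, hc⟩
    · exact ⟨("message sent", 1), by simp [pvCatalog], rfl, hc⟩
    · exact ⟨("posted to slack", 2), by simp [pvCatalog], rfl, hc⟩
    · exact ⟨("posted to channel", 2), by simp [pvCatalog], rfl, hc⟩
    · exact ⟨("ticket-", 3), by simp [pvCatalog], rfl, hc⟩
    · exact ⟨("f-2026-", 4), by simp [pvCatalog], rfl, hc⟩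
    · exact ⟨("api key rotation", 4), by simp [pvCatalog], rfl, hc⟩
    · exact ⟨("confidential", 4), by simp [pvCatalog], rfl, hc⟩
    · exact ⟨("fix is already deployed", 5), by simp [pvCatalog], rfl, hc⟩
    · exact ⟨("fix is live", 5), by simp [pvCatalog], rfl, hc⟩
    · exact ⟨("in production", 5), by simp [pvCatalog], rfl, hc⟩
    · exact ⟨("by 10am", 6), by simp [pvCatalog], rfl, hc⟩
    · exact ⟨("within an hour", 6), by simp [pvCatalog], rfl, hc⟩
    · exact ⟨("deploy by 1pm", 6), by simp [pvCatalog], rfl, hc⟩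
    · exact ⟨("irreversible", 7), by simp [pvCatalog], rfl, hc⟩
    · exact ⟨("event created", 7), by simp [pvCatalog], rfl, hc⟩
    · exact ⟨("task updated", 7), by simp [pvCatalog], rfl, hc⟩
    · exact ⟨("layoff", 8), by simp [pvCatalog], rfl, hc⟩
    · exact ⟨("headcount reduction", 8), by simp [pvCatalog], rfl, hc⟩
  · rintro ⟨e, he, rfl, hc⟩
    simp only [pvCatalog, List.mem_cons, List.not_mem_nil, or_false] at he
    rcases he with rfl | rfl | rfl | rfl | rfl | rfl | rfl | rfl | rfl | rfl |
      rfl | rfl | rfl | rfl | rfl | rfl | rfl | rfl | rfl <;> simp_all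

theorem pv_mem_alt (signals : List (List (String × String))) (x : String) :
    x ∈ infer_unsafe_indicators_alt signals ↔ ∃ sig ∈ signals, pvHit x (pvLower sig) := by
  simp only [infer_unsafe_indicators_alt, List.mem_map, List.mem_filter, List.any_eq_true,
    List.mem_map]
  constructor
  · rintro ⟨e, ⟨he, t, ⟨sig, hsig, rfl⟩, ht⟩, rfl⟩
    exact ⟨sig, hsig, (pv_hit_iff_catalog _ _).2 ⟨e, he, rfl, ht⟩⟩
  · rintro ⟨sig, hsig, hh⟩
    rcases (pv_hit_iff_catalog _ _).1 hh with ⟨e, he, rfl, ht⟩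
    exact ⟨e, ⟨he, pvLower sig, ⟨sig, hsig, rfl⟩, ht⟩, rfl⟩

theorem pv_pairwise_alt (signals : List (List (String × String))) :
    (infer_unsafe_indicators_alt signals).Pairwise (· < ·) := by
  have hsub : (infer_unsafe_indicators_alt signals).Sublist (pvCatalog.map (fun e => e.1)) := by
    simp only [infer_unsafe_indicators_alt]
    exact List.Sublist.map _ List.filter_sublist
  have hcat : (pvCatalog.map (fun e => e.1)).Pairwise (fun a b => a.toList < b.toList) := by
    decide
  have hcat : (pvCatalog.map (fun e => e.1)).Pairwise (· < ·) :=
    hcat.imp (fun h => String.lt_iff_toList_lt.mpr h)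
  exact hcat.sublist hsub

-- ===== VERDICT (by name: the statement is the Claim_ definition above) =====
theorem infer_unsafe_indicators_spec : Claim_equal_infer_unsafe_indicators := by
  intro signals _
  unfold Spec_infer_unsafe_indicators infer_unsafe_indicators
  apply PySem.List.sorted_eq_of_perm_of_pairwise_lt
  · refine (List.perm_ext_iff_of_nodup ?_ ?_).2 ?_
    · exact (pv_pairwise_alt signals).nodup
    · exact pv_nodup_foldA signals PySem.Set.empty List.nodup_nil
    · intro x
      rw [pv_mem_alt, pv_mem_foldA]
      simp [PySem.Set.empty]
  · exact pv_pairwise_alt signals
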